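-- pv_equiv track=rewrite | github.com/VlasovVasylii/omgtu | проектирование и тестирование по/2 лаба/main.py | restore_original
-- ===== SOURCE A (Python) =====
-- def restore_original(fragments):
--     if not fragments:
--         return ""
--
--     fragments_sorted = sorted(fragments, key=lambda x: len(x))
--     min_len = len(fragments_sorted[0])
--     max_len = len(fragments_sorted[-1])
--     total_length = min_len + max_len
--
--     # Перебираем все возможные пары фрагментов
--     for i in range(len(fragments_sorted)):
--         for j in range(len(fragments_sorted)):
--             if i == j:
--                 continue
--             a, b = fragments_sorted[i], fragments_sorted[j]
--             if len(a) + len(b) != total_length: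
--                 continue
--
--             # Пробуем обе комбинации (a + b и b + a)
--             candidates = [a + b, b + a]
--             for candidate in candidates:
--                 used = [False] * len(fragments_sorted)
--                 used[i] = used[j] = True
--
--                 # Проверяем, можно ли составить файл из оставшихся фрагментов
--                 valid = True
--                 for k in range(len(fragments_sorted)):
--                     if used[k]:
--                         continue
--                     current = fragments_sorted[k]
--                     needed_len = total_length - len(current)
--                     found = False
--                     for l in range(len(fragments_sorted)):
--                         if not used[l] and len(fragments_sorted[l]) == needed_len:
--                             combined = current + fragments_sorted[l]
--                             combined_rev = fragments_sorted[l] + current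
--                             if combined == candidate or combined_rev == candidate:
--                                 used[k] = used[l] = True
--                                 found = True
--                                 break
--                     if not found:
--                         valid = False
--                         break
--
--                 if valid:
--                     return candidate
--
--     return ""
-- ===== SOURCE B (Python) =====
-- def restore_original(fragments):
--     if not fragments:
--         return ""
--     frags = sorted(fragments, key=len)
--     total = len(frags[0]) + len(frags[-1])
--     head = frags[0]
--     counts = {}
--     for f in frags:
--         counts[f] = counts.get(f, 0) + 1
--     for b in frags[1:]:
--         if len(head) + len(b) != total:
--             continue
--         for cand in (head + b, b + head):
--             if _pairs_up(cand, counts, total):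
--                 return cand
--     return ""
--
--
-- def _pairs_up(cand, counts, total):
--     # every fragment must be the prefix or the suffix of cand of its own length
--     for f in counts:
--         if f != cand[:len(f)] and f != cand[total - len(f):]:
--             return False
--     # prefixes of length m pair with suffixes of length total - m: compare counts
--     for f in counts:
--         m = len(f)
--         k = total - m
--         p, s = cand[:m], cand[total - m:]
--         q, t = cand[:k], cand[total - k:]
--         cp, cs = counts.get(p, 0), counts.get(s, 0)
--         cq, ct = counts.get(q, 0), counts.get(t, 0)
--         if m == k:
--             if p != s and cp != cs:
--                 return False
--         elif p == s:
--             if q == t: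
--                 if cp != cq:
--                     return False
--             elif cp != cq + ct:
--                 return False
--         elif q == t:
--             if cq != cp + cs:
--                 return False
--         elif cp != ct or cs != cq:
--             return False
--     return True
-- ===== Notes on version B (the rewrite author's own statement) =====
-- stated objective: faster
-- what changed: B only pairs the shortest fragment with each other fragment (provably sufficient: any reconstruction pairs the shortest fragment too) and verifies a candidate by comparing multiplicities of the determined prefix/suffix complements in a value-count dict, replacing A's O(n^2) pair enumeration each verified by a greedy quadratic matching loop that concatenates and compares remaining pairs.
import Mathlib
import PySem

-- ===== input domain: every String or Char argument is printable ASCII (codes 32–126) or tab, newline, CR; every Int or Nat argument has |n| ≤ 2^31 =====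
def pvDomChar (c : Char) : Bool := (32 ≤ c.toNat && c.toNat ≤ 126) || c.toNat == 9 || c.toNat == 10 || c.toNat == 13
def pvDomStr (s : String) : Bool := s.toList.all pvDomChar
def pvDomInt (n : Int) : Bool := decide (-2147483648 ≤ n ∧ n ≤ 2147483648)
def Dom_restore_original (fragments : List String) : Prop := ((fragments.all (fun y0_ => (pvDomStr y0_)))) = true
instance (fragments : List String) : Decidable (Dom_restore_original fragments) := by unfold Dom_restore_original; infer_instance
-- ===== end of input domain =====

-- B pairs only the shortest fragment with each other fragment and verifies a candidate by
-- comparing multiplicities of its determined prefix/suffix complements in a value-count dict,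
-- replacing A's pair enumeration over all (i, j) verified by a greedy quadratic matching loop.

-- ===== PORT A =====
-- inner 'for l in range(n)' scan: first unused l of the needed length whose concatenation with cur gives the candidate
def pvA_findL (frs : List (List Char)) (c cur : List Char) (needed : Int) (used : List Bool) : List Nat → Option Nat
  | [] => none
  | l :: ls =>
    if !(used.getD l true) ∧ ((frs.getD l []).length : Int) = needed ∧
        (cur ++ frs.getD l [] = c ∨ frs.getD l [] ++ cur = c)
    then some l
    else pvA_findL frs c cur needed used ls

-- the 'for k in range(n)' validity loop with its used flags ('valid=False; break' = returning false)
def pvA_check (frs : List (List Char)) (total : Int) (c : List Char) : List Bool → List Nat → Bool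
  | _, [] => true
  | used, k :: ks =>
    if used.getD k true then pvA_check frs total c used ks
    else
      match pvA_findL frs c (frs.getD k []) (total - ((frs.getD k []).length : Int)) used
          (List.range frs.length) with
      | some l => pvA_check frs total c ((used.set k true).set l true) ks
      | none => false

-- 'for candidate in candidates'
def pvA_tryCands (frs : List (List Char)) (total : Int) (i j : Nat) : List (List Char) → Option (List Char)
  | [] => none
  | c :: cs =>
    if pvA_check frs total c (((List.replicate frs.length false).set i true).set j true)
        (List.range frs.length)
    then some c
    else pvA_tryCands frs total i j cs

def pvA_loopJ (frs : List (List Char)) (total : Int) (i : Nat) : List Nat → Option (List Char)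
  | [] => none
  | j :: js =>
    if i = j then pvA_loopJ frs total i js
    else if ¬(((frs.getD i []).length : Int) + ((frs.getD j []).length : Int) = total) then
      pvA_loopJ frs total i js
    else
      match pvA_tryCands frs total i j
          [frs.getD i [] ++ frs.getD j [], frs.getD j [] ++ frs.getD i []] with
      | some c => some c
      | none => pvA_loopJ frs total i js

def pvA_loopI (frs : List (List Char)) (total : Int) : List Nat → Option (List Char)
  | [] => none
  | i :: is =>
    match pvA_loopJ frs total i (List.range frs.length) with
    | some c => some c
    | none => pvA_loopI frs total is

def restore_original (fragments : List String) : String :=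
  if fragments = [] then ""
  else
    let frs := (PySem.List.sorted fragments (fun x => PySem.Str.len x) false).map String.toList
    let total : Int := ((PySem.List.pyGetD frs 0 []).length : Int) + ((PySem.List.pyGetD frs (-1) []).length : Int)
    match pvA_loopI frs total (List.range frs.length) with
    | some c => String.ofList c
    | none => ""

-- ===== PORT B =====
-- first loop of _pairs_up: every fragment value must be the prefix or the suffix of cand of its own length
def pvB_prefsufLoop (cand : List Char) (total : Int) : List (List Char) → Bool
  | [] => true
  | f :: fs =>
    if f ≠ PySem.List.slice cand none (some (f.length : Int)) ∧
        f ≠ PySem.List.slice cand (some (total - (f.length : Int))) none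
    then false
    else pvB_prefsufLoop cand total fs

-- second loop of _pairs_up: the count comparisons, one key at a time
def pvB_condLoop (cand : List Char) (total : Int) (counts : PySem.Dict (List Char) Int) :
    List (List Char) → Bool
  | [] => true
  | f :: fs =>
    let m : Int := (f.length : Int)
    let k : Int := total - m
    let p := PySem.List.slice cand none (some m)
    let s := PySem.List.slice cand (some (total - m)) none
    let q := PySem.List.slice cand none (some k)
    let t := PySem.List.slice cand (some (total - k)) none
    let cp := counts.getD p 0
    let cs := counts.getD s 0
    let cq := counts.getD q 0
    let ct := counts.getD t 0
    if m = k then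
      (if p ≠ s ∧ cp ≠ cs then false else pvB_condLoop cand total counts fs)
    else if p = s then
      (if q = t then (if cp ≠ cq then false else pvB_condLoop cand total counts fs)
       else if cp ≠ cq + ct then false else pvB_condLoop cand total counts fs)
    else if q = t then
      (if cq ≠ cp + cs then false else pvB_condLoop cand total counts fs)
    else if cp ≠ ct ∨ cs ≠ cq then false
    else pvB_condLoop cand total counts fs

def pvB_pairsUp (cand : List Char) (counts : PySem.Dict (List Char) Int) (total : Int) : Bool :=
  pvB_prefsufLoop cand total counts.keys && pvB_condLoop cand total counts counts.keys

-- 'for b in frags[1:]'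
def pvB_scan (head : List Char) (total : Int) (counts : PySem.Dict (List Char) Int) :
    List (List Char) → Option (List Char)
  | [] => none
  | b :: bs =>
    if ¬((head.length : Int) + (b.length : Int) = total) then pvB_scan head total counts bs
    else if pvB_pairsUp (head ++ b) counts total then some (head ++ b)
    else if pvB_pairsUp (b ++ head) counts total then some (b ++ head)
    else pvB_scan head total counts bs

def restore_original_alt (fragments : List String) : String :=
  if fragments = [] then ""
  else
    let frs := (PySem.List.sorted fragments (fun x => PySem.Str.len x) false).map String.toList
    let total : Int := ((PySem.List.pyGetD frs 0 []).length : Int) + ((PySem.List.pyGetD frs (-1) []).length : Int)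
    let head := PySem.List.pyGetD frs 0 []
    let counts := frs.foldl (fun d f => d.insert f (d.getD f 0 + 1)) PySem.Dict.empty
    match pvB_scan head total counts (PySem.List.slice frs (some 1) none) with
    | some c => String.ofList c
    | none => ""

-- ===== PRECONDITION & SPEC =====
def Spec_restore_original (fragments : List String) (out : String) : Prop := out = restore_original_alt fragments
instance (fragments : List String) (out : String) : Decidable (Spec_restore_original fragments out) := by unfold Spec_restore_original; infer_instance

-- ===== CLAIM (what is proved, stated in full; the proofs are below) =====
def Claim_equal_restore_original : Prop := ∀ (fragments : List String), Dom_restore_original fragments → Spec_restore_original fragments (restore_original fragments)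


-- ===== LEMMAS AND PROOFS =====

-- greedy-matching reformulation of A's check loop (proof-layer bridge)
def pvG_complements (cand h : List Char) : List (List Char) :=
  let out := if PySem.Chars.startswith cand h then [PySem.List.slice cand (some (h.length : Int)) none] else []
  if PySem.Chars.endswith cand h then
    let w := PySem.List.slice cand none (some ((cand.length : Int) - (h.length : Int)))
    if w ∈ out then out else out ++ [w]
  else out

def pvG_findPos (wanted : List (List Char)) (t : Nat) : List (List Char) → Option Nat
  | [] => none
  | x :: xs => if x ∈ wanted then some t else pvG_findPos wanted (t + 1) xs

def pvG_assemble (cand : List Char) : List (List Char) → Bool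
  | [] => true
  | h :: rest =>
    if h ∈ pvG_complements cand h then pvG_assemble cand rest
    else
      match pvG_findPos (pvG_complements cand h) 0 rest with
      | some pos => pvG_assemble cand (rest.eraseIdx pos)
      | none => false
  termination_by l => l.length
  decreasing_by
    · simp
    · simp only [List.length_cons]
      exact Nat.lt_succ_of_le (List.length_eraseIdx_le _ _)

-- counting characterization: the pairing condition for the length class m
def pvCond (c : List Char) (xs : List (List Char)) (m : Nat) : Prop :=
  if m = c.length - m then
    (c.take m ≠ c.drop (c.length - m) → xs.count (c.take m) = xs.count (c.drop (c.length - m)))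
  else if c.take m = c.drop (c.length - m) then
    (if c.take (c.length - m) = c.drop m
     then xs.count (c.take m) = xs.count (c.take (c.length - m))
     else xs.count (c.take m) = xs.count (c.take (c.length - m)) + xs.count (c.drop m))
  else if c.take (c.length - m) = c.drop m then
    xs.count (c.take (c.length - m)) = xs.count (c.take m) + xs.count (c.drop (c.length - m))
  else
    xs.count (c.take m) = xs.count (c.drop m) ∧
      xs.count (c.drop (c.length - m)) = xs.count (c.take (c.length - m))

def pvPS (c f : List Char) : Prop :=
  f = c.take f.length ∨ f = c.drop (c.length - f.length)

def pvValid (c : List Char) (xs : List (List Char)) : Prop :=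
  (∀ f ∈ xs, pvPS c f) ∧ ∀ m, m ≤ c.length → pvCond c xs m

theorem pvGetD_set_self_true (used : List Bool) (l : Nat) : (used.set l true).getD l true = true := by
  by_cases h : l < used.length
  · simp [List.getD, List.getElem?_set_self h]
  · rw [List.set_eq_of_length_le (by omega)]
    rw [List.getD, List.getElem?_eq_none_iff.mpr (by omega)]
    rfl

theorem pvGetD_set_ne (used : List Bool) (l m : Nat) (v : Bool) (h : m ≠ l) :
    (used.set l v).getD m true = used.getD m true := by
  simp [List.getD, Ne.symm h]

theorem pvAppend_left_iff (c cur x : List Char) :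
    cur ++ x = c ↔ cur <+: c ∧ x = c.drop cur.length := by
  constructor
  · rintro rfl
    exact ⟨⟨x, rfl⟩, by simp⟩
  · rintro ⟨⟨y, rfl⟩, rfl⟩
    simp

theorem pvAppend_right_iff (c cur x : List Char) :
    x ++ cur = c ↔ cur <:+ c ∧ x = c.take (c.length - cur.length) := by
  constructor
  · rintro rfl
    refine ⟨⟨x, rfl⟩, ?_⟩
    rw [List.take_left' (by simp)]
  · rintro ⟨⟨y, rfl⟩, rfl⟩
    have h : (y ++ cur).length - cur.length = y.length := by simp
    rw [h, List.take_left' rfl]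

theorem pvMem_complements (c cur x : List Char) :
    x ∈ pvG_complements c cur ↔ (cur ++ x = c ∨ x ++ cur = c) := by
  unfold pvG_complements
  rw [pvAppend_left_iff, pvAppend_right_iff]
  by_cases hs : PySem.Chars.startswith c cur = true <;>
    by_cases he : PySem.Chars.endswith c cur = true
  · have hpre := (PySem.Chars.startswith_iff c cur).mp hs
    have hsuf := (PySem.Chars.endswith_iff c cur).mp he
    have hd : cur.length ≤ c.length := hsuf.length_le
    have hcast : (c.length : Int) - (cur.length : Int) = ((c.length - cur.length : Nat) : Int) := by omega
    simp only [hs, he, if_true, hcast, PySem.List.slice_from_natCast, PySem.List.slice_to_natCast]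
    by_cases hdup : c.take (c.length - cur.length) ∈ [c.drop cur.length]
    · simp only [List.mem_singleton] at hdup
      simp [hdup, hpre, hsuf]
    · simp only [List.mem_singleton] at hdup
      simp [hdup, hpre, hsuf]
  · have hpre := (PySem.Chars.startswith_iff c cur).mp hs
    have hnsuf : ¬ cur <:+ c := fun hh => he ((PySem.Chars.endswith_iff c cur).mpr hh)
    simp only [hs, he, if_true, PySem.List.slice_from_natCast]
    simp [hpre, hnsuf]
  · have hnpre : ¬ cur <+: c := fun hh => hs ((PySem.Chars.startswith_iff c cur).mpr hh)
    have hsuf := (PySem.Chars.endswith_iff c cur).mp he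
    have hd : cur.length ≤ c.length := hsuf.length_le
    have hcast : (c.length : Int) - (cur.length : Int) = ((c.length - cur.length : Nat) : Int) := by omega
    simp only [hs, he, if_true, hcast, PySem.List.slice_to_natCast]
    simp [hnpre, hsuf]
  · have hnpre : ¬ cur <+: c := fun hh => hs ((PySem.Chars.startswith_iff c cur).mpr hh)
    have hnsuf : ¬ cur <:+ c := fun hh => he ((PySem.Chars.endswith_iff c cur).mpr hh)
    simp [hs, he, hnpre, hnsuf]

theorem pvFindPos_shift (W : List (List Char)) (xs : List (List Char)) (t : Nat) :
    pvG_findPos W t xs = (pvG_findPos W 0 xs).map (· + t) := by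
  induction xs generalizing t with
  | nil => rfl
  | cons x xs ih =>
    simp only [pvG_findPos]
    by_cases hx : x ∈ W
    · simp [hx]
    · simp only [hx, if_false]
      rw [ih, ih 1, Option.map_map]
      congr 1
      funext p
      simp only [Function.comp_apply]
      omega

theorem pvFindL_skip (frs : List (List Char)) (c cur : List Char) (needed : Int) (used : List Bool)
    (ms ls : List Nat)
    (h : ∀ m ∈ ms, ¬(!(used.getD m true) ∧ ((frs.getD m []).length : Int) = needed ∧
        (cur ++ frs.getD m [] = c ∨ frs.getD m [] ++ cur = c))) :
    pvA_findL frs c cur needed used (ms ++ ls) = pvA_findL frs c cur needed used ls := by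
  induction ms with
  | nil => rfl
  | cons m ms ih =>
    simp only [List.cons_append, pvA_findL, if_neg (h m (by simp))]
    exact ih (fun m hm => h m (by simp [hm]))

theorem pvScan (frs : List (List Char)) (c cur : List Char) (needed : Int)
    (hW : ∀ x : List Char, (((x.length : Int) = needed ∧ (cur ++ x = c ∨ x ++ cur = c)) ↔ x ∈ pvG_complements c cur))
    (ls : List Nat) (used : List Bool) (hnd : ls.Nodup) :
    (match pvA_findL frs c cur needed used ls with
     | none => pvG_findPos (pvG_complements c cur) 0
         ((ls.filter (fun m => !(used.getD m true))).map (fun m => frs.getD m [])) = none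
     | some l => l ∈ ls ∧ ∃ pos,
         pvG_findPos (pvG_complements c cur) 0
           ((ls.filter (fun m => !(used.getD m true))).map (fun m => frs.getD m [])) = some pos ∧
         ((ls.filter (fun m => !((used.set l true).getD m true))).map (fun m => frs.getD m [])) =
           ((ls.filter (fun m => !(used.getD m true))).map (fun m => frs.getD m [])).eraseIdx pos) := by
  induction ls with
  | nil => simp [pvA_findL, pvG_findPos]
  | cons m ls ih =>
    have hm : m ∉ ls := (List.nodup_cons.mp hnd).1
    have hnd' : ls.Nodup := (List.nodup_cons.mp hnd).2
    by_cases hu : used.getD m true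
    · have hcond : ¬((!(used.getD m true)) = true ∧ ((frs.getD m []).length : Int) = needed ∧
          (cur ++ frs.getD m [] = c ∨ frs.getD m [] ++ cur = c)) := by rw [hu]; simp
      simp only [pvA_findL, List.filter_cons, hu, Bool.not_true, Bool.false_eq_true, false_and,
        if_false]
      rcases hA : pvA_findL frs c cur needed used ls with _ | l
      · have := ih hnd'
        rw [hA] at this
        exact this
      · have := ih hnd'
        rw [hA] at this
        obtain ⟨hl, pos, h1, h2⟩ := this
        have hdropm : (used.set l true).getD m true = true := by
          rw [pvGetD_set_ne used l m true (fun hh => hm (hh ▸ hl))]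
          exact hu
        refine ⟨List.mem_cons_of_mem _ hl, pos, h1, ?_⟩
        simp only [hdropm, Bool.not_true, Bool.false_eq_true, if_false]
        exact h2
    · replace hu : used.getD m true = false := by simpa using hu
      by_cases hin : frs.getD m [] ∈ pvG_complements c cur
      · have hcond : ((!(used.getD m true)) = true ∧ ((frs.getD m []).length : Int) = needed ∧
            (cur ++ frs.getD m [] = c ∨ frs.getD m [] ++ cur = c)) :=
          ⟨by rw [hu]; rfl, ((hW _).mpr hin).1, ((hW _).mpr hin).2⟩
        simp only [pvA_findL, if_pos hcond]
        refine ⟨List.mem_cons_self, 0, ?_, ?_⟩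
        · simp only [List.filter_cons, hu, Bool.not_false, if_true, List.map_cons, pvG_findPos,
            if_pos hin]
        · simp only [List.filter_cons, pvGetD_set_self_true, Bool.not_true, hu,
            Bool.not_false, if_true, List.map_cons, List.eraseIdx_cons_zero]
          congr 1
          apply List.filter_congr
          intro k hk
          rw [pvGetD_set_ne used m k true (fun hh => hm (hh ▸ hk))]
      · have hcond : ¬((!(used.getD m true)) = true ∧ ((frs.getD m []).length : Int) = needed ∧
            (cur ++ frs.getD m [] = c ∨ frs.getD m [] ++ cur = c)) := by
          rintro ⟨_, h1, h2⟩
          exact hin ((hW _).mp ⟨h1, h2⟩)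
        simp only [pvA_findL, if_neg hcond]
        have hfc : ((m :: ls).filter (fun k => !(used.getD k true))).map (fun k => frs.getD k []) =
            frs.getD m [] :: ((ls.filter (fun k => !(used.getD k true))).map (fun k => frs.getD k [])) := by
          rw [List.filter_cons, if_pos (by rw [hu]; rfl)]
          rfl
        rcases hA : pvA_findL frs c cur needed used ls with _ | l
        · have := ih hnd'
          rw [hA] at this
          simp only [hfc, pvG_findPos, if_neg hin]
          rw [pvFindPos_shift, this]
          rfl
        · have := ih hnd'
          rw [hA] at this
          obtain ⟨hl, pos, h1, h2⟩ := this
          have hlm : l ≠ m := fun hh => hm (hh ▸ hl)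
          refine ⟨List.mem_cons_of_mem _ hl, pos + 1, ?_, ?_⟩
          · simp only [hfc, pvG_findPos, if_neg hin]
            rw [pvFindPos_shift, h1]
            rfl
          · have hkeep : (used.set l true).getD m true = false := by
              rw [pvGetD_set_ne used l m true (Ne.symm hlm)]
              exact hu
            rw [hfc]
            simp only [List.filter_cons, hkeep, Bool.not_false, if_true, List.map_cons,
              List.eraseIdx_cons_succ]
            rw [h2]

theorem pvCheckEq (frs : List (List Char)) (total : Int) (c : List Char)
    (hc : (c.length : Int) = total) :
    ∀ (fuel t : Nat) (used : List Bool), frs.length = t + fuel →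
      (∀ m, m < t → used.getD m true = true) →
      pvA_check frs total c used ((List.range frs.length).drop t) =
      pvG_assemble c ((((List.range frs.length).drop t).filter (fun m => !(used.getD m true))).map
        (fun m => frs.getD m [])) := by
  intro fuel
  induction fuel with
  | zero =>
    intro t used hn hinv
    have hnil : (List.range frs.length).drop t = [] := by
      apply List.drop_eq_nil_of_le
      simp
      omega
    rw [hnil]
    simp [pvA_check, pvG_assemble]
  | succ fuel ih =>
    intro t used hn hinv
    have ht : t < frs.length := by omega
    have hdrop : (List.range frs.length).drop t = t :: (List.range frs.length).drop (t + 1) := by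
      have h1 : frs.length - t = (frs.length - (t + 1)) + 1 := by omega
      simp [List.range_eq_range', List.drop_range', h1, List.range'_succ]
    have hmem : ∀ m ∈ (List.range frs.length).drop (t + 1), t + 1 ≤ m := by
      intro m hm
      rw [List.range_eq_range', List.drop_range'] at hm
      have := (List.mem_range'_1.mp hm).1
      omega
    have hnd : ((List.range frs.length).drop (t + 1)).Nodup := by
      rw [List.range_eq_range', List.drop_range']
      exact List.nodup_range'
    rw [hdrop]
    by_cases hu0 : used.getD t true
    · simp only [pvA_check, hu0, if_true, List.filter_cons, Bool.not_true, Bool.false_eq_true,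
        if_false]
      exact ih (t + 1) used (by omega)
        (fun m hm => by rcases Nat.lt_succ_iff_lt_or_eq.mp hm with h | h
                        · exact hinv m h
                        · rw [h]; exact hu0)
    · replace hu0 : used.getD t true = false := by simpa using hu0
      have hW : ∀ x : List Char,
          (((x.length : Int) = total - ((frs.getD t []).length : Int) ∧
            (frs.getD t [] ++ x = c ∨ x ++ frs.getD t [] = c)) ↔ x ∈ pvG_complements c (frs.getD t [])) := by
        intro x
        rw [pvMem_complements]
        constructor
        · rintro ⟨_, hd⟩; exact hd
        · intro hd
          refine ⟨?_, hd⟩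
          rcases hd with hd | hd
          · have := congrArg List.length hd
            rw [List.length_append] at this
            omega
          · have := congrArg List.length hd
            rw [List.length_append] at this
            omega
      have hskip : pvA_findL frs c (frs.getD t []) (total - ((frs.getD t []).length : Int)) used
            (List.range frs.length) =
          pvA_findL frs c (frs.getD t []) (total - ((frs.getD t []).length : Int)) used
            (t :: (List.range frs.length).drop (t + 1)) := by
        conv_lhs => rw [← List.take_append_drop t (List.range frs.length)]
        rw [pvFindL_skip, hdrop]
        intro m hmem'
        have hmt : m < t := by
          rw [List.take_range] at hmem'
          have := List.mem_range.mp hmem'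
          omega
        rintro ⟨h1, _⟩
        rw [hinv m hmt] at h1
        simp at h1
      simp only [pvA_check, hu0, Bool.false_eq_true, if_false, hskip]
      rw [List.filter_cons, if_pos (by rw [hu0]; rfl)]
      simp only [List.map_cons]
      by_cases hin : frs.getD t [] ∈ pvG_complements c (frs.getD t [])
      · have hcond : ((!(used.getD t true)) = true ∧
            ((frs.getD t []).length : Int) = total - ((frs.getD t []).length : Int) ∧
            (frs.getD t [] ++ frs.getD t [] = c ∨ frs.getD t [] ++ frs.getD t [] = c)) := by
          refine ⟨by rw [hu0]; rfl, ((hW _).mpr hin).1, ?_⟩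
          rcases ((hW _).mpr hin).2 with hd | hd
          · exact Or.inl hd
          · exact Or.inl hd
        simp only [pvA_findL, if_pos hcond]
        rw [pvG_assemble]
        simp only [if_pos hin]
        rw [List.set_set]
        rw [ih (t + 1) (used.set t true) (by omega)
          (fun m hm => by rcases Nat.lt_succ_iff_lt_or_eq.mp hm with h | h
                          · rw [pvGetD_set_ne used t m true (by omega)]
                            exact hinv m h
                          · rw [h]
                            exact pvGetD_set_self_true used t)]
        congr 1
        congr 1
        apply List.filter_congr
        intro k hk
        rw [pvGetD_set_ne used t k true (by have := hmem k hk; omega)]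
      · have hcond : ¬((!(used.getD t true)) = true ∧
            ((frs.getD t []).length : Int) = total - ((frs.getD t []).length : Int) ∧
            (frs.getD t [] ++ frs.getD t [] = c ∨ frs.getD t [] ++ frs.getD t [] = c)) := by
          rintro ⟨_, h1, h2⟩
          exact hin ((hW _).mp ⟨h1, by tauto⟩)
        simp only [pvA_findL, if_neg hcond]
        rw [pvG_assemble]
        simp only [if_neg hin]
        have hscan := pvScan frs c (frs.getD t []) (total - ((frs.getD t []).length : Int)) hW
          ((List.range frs.length).drop (t + 1)) used hnd
        rcases hF : pvA_findL frs c (frs.getD t []) (total - ((frs.getD t []).length : Int)) used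
            ((List.range frs.length).drop (t + 1)) with _ | l
        · rw [hF] at hscan
          rw [hscan]
        · rw [hF] at hscan
          obtain ⟨hl, pos, h1, h2⟩ := hscan
          have hlt : t + 1 ≤ l := hmem l hl
          rw [h1]
          dsimp only
          rw [ih (t + 1) ((used.set t true).set l true) (by omega)
            (fun m hm => by rcases Nat.lt_succ_iff_lt_or_eq.mp hm with h | h
                            · rw [pvGetD_set_ne _ l m true (by omega),
                                pvGetD_set_ne used t m true (by omega)]
                              exact hinv m h
                            · rw [h, pvGetD_set_ne _ l t true (by omega)]
                              exact pvGetD_set_self_true used t)]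
          rw [← h2]
          congr 1
          congr 1
          apply List.filter_congr
          intro k hk
          by_cases hkl : k = l
          · rw [hkl, pvGetD_set_self_true, pvGetD_set_self_true]
          · rw [pvGetD_set_ne _ l k true hkl, pvGetD_set_ne _ l k true hkl,
              pvGetD_set_ne used t k true (by have := hmem k hk; omega)]

-- ===== counting characterization of the greedy check =====

theorem pvCond_congr (c : List Char) (xs ys : List (List Char)) (m : Nat)
    (h : ∀ v, xs.count v = ys.count v) : pvCond c xs m ↔ pvCond c ys m := by
  unfold pvCond
  simp only [h]

theorem pvCount_congr_valid (c : List Char) (xs ys : List (List Char))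
    (h : ∀ v, xs.count v = ys.count v) : pvValid c xs ↔ pvValid c ys := by
  have hmem : ∀ v : List Char, v ∈ xs ↔ v ∈ ys := by
    intro v
    rw [← List.count_pos_iff, ← List.count_pos_iff, h]
  unfold pvValid
  constructor
  · rintro ⟨h1, h2⟩
    exact ⟨fun f hf => h1 f ((hmem f).mpr hf), fun m hm => (pvCond_congr c xs ys m h).mp (h2 m hm)⟩
  · rintro ⟨h1, h2⟩
    exact ⟨fun f hf => h1 f ((hmem f).mp hf), fun m hm => (pvCond_congr c xs ys m h).mpr (h2 m hm)⟩

theorem pvCond_nil (c : List Char) (m : Nat) : pvCond c [] m := by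
  unfold pvCond
  split_ifs <;> simp

theorem pvCond_symm (c : List Char) (xs : List (List Char)) (m : Nat) (hm : m ≤ c.length) :
    pvCond c xs (c.length - m) ↔ pvCond c xs m := by
  have hmm : c.length - (c.length - m) = m := Nat.sub_sub_self hm
  by_cases heq : m = c.length - m
  · rw [← heq]
  · unfold pvCond
    rw [hmm]
    rw [if_neg heq, if_neg (by omega)]
    split_ifs <;> omega

theorem pvValid_pair_cons (c h x : List Char) (zs : List (List Char)) (hc : h ++ x = c) :
    pvValid c (h :: x :: zs) ↔ pvValid c zs := by
  have hlen : c.length = h.length + x.length := by rw [← hc]; simp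
  have hh : c.take h.length = h := by rw [← hc]; exact List.take_left
  have hx : c.drop h.length = x := by rw [← hc]; exact List.drop_left
  have hne_len : ∀ u w : List Char, u.length ≠ w.length → u ≠ w := fun u w hl e => hl (by rw [e])
  have hc2 : ∀ v : List Char,
      (h :: x :: zs).count v = zs.count v + ((if x = v then 1 else 0) + (if h = v then 1 else 0)) := by
    intro v
    simp only [List.count_cons, beq_iff_eq]
    split_ifs <;> omega
  have hM0 : pvCond c (h :: x :: zs) h.length ↔ pvCond c zs h.length := by
    have hsx : c.length - h.length = x.length := by omega
    have hSlen : (c.drop x.length).length = h.length := by simp; omega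
    have hQlen : (c.take x.length).length = x.length := by simp; omega
    unfold pvCond
    rw [hsx, hh, hx]
    by_cases b1 : h.length = x.length
    · rw [if_pos b1, if_pos b1]
      have hSx : c.drop x.length = x := by rw [← b1]; exact hx
      rw [hSx]
      by_cases hhx : h = x
      · simp [hhx]
      · have e1 := hc2 h
        have e2 := hc2 x
        rw [if_neg (fun e => hhx e.symm), if_pos rfl] at e1
        rw [if_pos rfl, if_neg hhx] at e2
        constructor <;> intro hi hne <;> (have := hi hne; omega)
    · rw [if_neg b1, if_neg b1]
      have eh := hc2 h
      rw [if_neg (hne_len x h (by omega)), if_pos rfl] at eh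
      have ex := hc2 x
      rw [if_pos rfl, if_neg (hne_len h x (by omega))] at ex
      have eS := hc2 (c.drop x.length)
      have eQ := hc2 (c.take x.length)
      by_cases b2 : h = c.drop x.length
      · rw [if_pos b2, if_pos b2]
        by_cases b3 : c.take x.length = x
        · rw [if_pos b3, if_pos b3, b3]
          omega
        · rw [if_neg b3, if_neg b3]
          rw [if_neg (fun e => b3 e.symm), if_neg (hne_len h _ (by rw [hQlen]; omega))] at eQ
          omega
      · rw [if_neg b2, if_neg b2]
        rw [if_neg (hne_len x _ (by rw [hSlen]; omega)), if_neg b2] at eS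
        by_cases b3 : c.take x.length = x
        · rw [if_pos b3, if_pos b3, b3]
          omega
        · rw [if_neg b3, if_neg b3]
          rw [if_neg (fun e => b3 e.symm), if_neg (hne_len h _ (by rw [hQlen]; omega))] at eQ
          constructor <;> rintro ⟨u1, u2⟩ <;> exact ⟨by omega, by omega⟩
  have hcond : ∀ m, m ≤ c.length → (pvCond c (h :: x :: zs) m ↔ pvCond c zs m) := by
    intro m hm
    by_cases hm0 : m = h.length
    · rw [hm0]; exact hM0
    · by_cases hk0 : m = x.length
      · have hm0' : c.length - x.length = h.length := by omega
        have s1 := pvCond_symm c (h :: x :: zs) x.length (by omega)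
        have s2 := pvCond_symm c zs x.length (by omega)
        rw [hm0'] at s1 s2
        rw [hk0]
        exact (s1.symm.trans hM0).trans s2
      · have hnov : ∀ v : List Char, v.length = m ∨ v.length = c.length - m →
            (h :: x :: zs).count v = zs.count v := by
          intro v hv
          have n1 : x ≠ v := hne_len x v (by omega)
          have n2 : h ≠ v := hne_len h v (by omega)
          rw [hc2 v]
          simp [n1, n2]
        unfold pvCond
        rw [hnov (c.take m) (Or.inl (by simp; omega)),
          hnov (c.drop (c.length - m)) (Or.inl (by simp; omega)),
          hnov (c.take (c.length - m)) (Or.inr (by simp)),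
          hnov (c.drop m) (Or.inr (by simp))]
  have hPSh : pvPS c h := Or.inl hh.symm
  have hPSx : pvPS c x := Or.inr (by rw [hlen, Nat.add_sub_cancel, hx])
  constructor
  · rintro ⟨h1, h2⟩
    exact ⟨fun f hf => h1 f (by simp [hf]), fun m hm => (hcond m hm).mp (h2 m hm)⟩
  · rintro ⟨h1, h2⟩
    refine ⟨fun f hf => ?_, fun m hm => (hcond m hm).mpr (h2 m hm)⟩
    rcases List.mem_cons.mp hf with rfl | hf'
    · exact hPSh
    rcases List.mem_cons.mp hf' with rfl | hf''
    · exact hPSx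
    · exact h1 f hf''

theorem pvValid_self_cons (c h : List Char) (zs : List (List Char)) (hc : c = h ++ h) :
    pvValid c (h :: zs) ↔ pvValid c zs := by
  have hlen : c.length = h.length + h.length := by rw [hc]; simp
  have hh : c.take h.length = h := by rw [hc]; exact List.take_left
  have hx : c.drop h.length = h := by rw [hc]; exact List.drop_left
  have hne_len : ∀ u w : List Char, u.length ≠ w.length → u ≠ w := fun u w hl e => hl (by rw [e])
  have hc1 : ∀ v : List Char, (h :: zs).count v = zs.count v + (if h = v then 1 else 0) := by
    intro v
    simp only [List.count_cons, beq_iff_eq]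
  have hcond : ∀ m, m ≤ c.length → (pvCond c (h :: zs) m ↔ pvCond c zs m) := by
    intro m hm
    by_cases hm0 : m = h.length
    · rw [hm0]
      unfold pvCond
      have hsx : c.length - h.length = h.length := by omega
      rw [hsx, hh, hx]
      simp
    · have hnov : ∀ v : List Char, v.length = m ∨ v.length = c.length - m →
          (h :: zs).count v = zs.count v := by
        intro v hv
        have n2 : h ≠ v := hne_len h v (by omega)
        rw [hc1 v]
        simp [n2]
      unfold pvCond
      rw [hnov (c.take m) (Or.inl (by simp; omega)),
        hnov (c.drop (c.length - m)) (Or.inl (by simp; omega)),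
        hnov (c.take (c.length - m)) (Or.inr (by simp)),
        hnov (c.drop m) (Or.inr (by simp))]
  constructor
  · rintro ⟨h1, h2⟩
    exact ⟨fun f hf => h1 f (by simp [hf]), fun m hm => (hcond m hm).mp (h2 m hm)⟩
  · rintro ⟨h1, h2⟩
    refine ⟨fun f hf => ?_, fun m hm => (hcond m hm).mpr (h2 m hm)⟩
    rcases List.mem_cons.mp hf with rfl | hf'
    · exact Or.inl hh.symm
    · exact h1 f hf'

theorem pvValid_fail (c h : List Char) (t : List (List Char))
    (hself : ¬ (h ++ h = c)) (hnone : ∀ x ∈ t, ¬(h ++ x = c ∨ x ++ h = c)) :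
    ¬ pvValid c (h :: t) := by
  rintro ⟨h1, h2⟩
  have hne_len : ∀ u w : List Char, u.length ≠ w.length → u ≠ w := fun u w hl e => hl (by rw [e])
  have hPS := h1 h List.mem_cons_self
  have hm0 : h.length ≤ c.length := by
    rcases hPS with e | e
    · have := congrArg List.length e
      simp at this
      omega
    · have := congrArg List.length e
      simp at this
      omega
  have hcount0 : ∀ v : List Char, (h ++ v = c ∨ v ++ h = c) → v ≠ h → (h :: t).count v = 0 := by
    intro v hv hvh
    have hnm : v ∉ t := fun hm => hnone v hm hv
    have h0 : t.count v = 0 := List.count_eq_zero.mpr hnm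
    simp [h0, Ne.symm hvh]
  have hcounth : 1 ≤ (h :: t).count h := by simp
  have hcond := h2 h.length hm0
  unfold pvCond at hcond
  by_cases hPc : h = c.take h.length
  · -- h is the length-m0 prefix of c
    have hpair : h ++ c.drop h.length = c := by
      have := List.take_append_drop h.length c
      rw [← hPc] at this
      exact this
    have hTne : c.drop h.length ≠ h := by
      intro e
      rw [e] at hpair
      exact hself hpair
    have hT0 : (h :: t).count (c.drop h.length) = 0 := hcount0 _ (Or.inl hpair) hTne
    by_cases b1 : h.length = c.length - h.length
    · rw [if_pos b1] at hcond
      have hsT : c.drop (c.length - h.length) = c.drop h.length := by rw [← b1]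
      rw [hsT, ← hPc] at hcond
      have := hcond (Ne.symm hTne)
      omega
    · rw [if_neg b1] at hcond
      by_cases b2 : c.take h.length = c.drop (c.length - h.length)
      · rw [if_pos b2] at hcond
        have hSh' : c.drop (c.length - h.length) = h := (hPc.trans b2).symm
        have hQS' : c.take (c.length - h.length) ++ h = c := by
          have := List.take_append_drop (c.length - h.length) c
          rw [hSh'] at this
          exact this
        have hQne : c.take (c.length - h.length) ≠ h :=
          hne_len _ _ (by rw [List.length_take]; omega)
        have hQ0 := hcount0 _ (Or.inr hQS') hQne
        by_cases b3 : c.take (c.length - h.length) = c.drop h.length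
        · rw [if_pos b3, ← hPc] at hcond
          omega
        · rw [if_neg b3, ← hPc] at hcond
          omega
      · rw [if_neg b2] at hcond
        by_cases b3 : c.take (c.length - h.length) = c.drop h.length
        · rw [if_pos b3] at hcond
          rw [b3, ← hPc] at hcond
          omega
        · rw [if_neg b3, ← hPc] at hcond
          omega
  · -- h is the length-m0 suffix of c (and not the prefix)
    have hSh : h = c.drop (c.length - h.length) := hPS.resolve_left hPc
    have hQS' : c.take (c.length - h.length) ++ h = c := by
      have := List.take_append_drop (c.length - h.length) c
      rw [← hSh] at this
      exact this
    have hQne : c.take (c.length - h.length) ≠ h := by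
      intro e
      rw [e] at hQS'
      exact hself hQS'
    have hQ0 := hcount0 _ (Or.inr hQS') hQne
    have hSc : 1 ≤ (h :: t).count (c.drop (c.length - h.length)) := by
      rw [← hSh]
      exact hcounth
    have hps : ¬ (c.take h.length = c.drop (c.length - h.length)) :=
      fun e => hPc (hSh.trans e.symm)
    by_cases b1 : h.length = c.length - h.length
    · rw [if_pos b1] at hcond
      have := hcond (Ne.symm (fun e => hps e.symm))
      -- count P = count S ≥ 1, so P ∈ t and P ++ h = c: contradiction with hnone
      have hQP : c.take (c.length - h.length) = c.take h.length := by rw [← b1]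
      rw [hQP] at hQS'
      have hPmem : c.take h.length ∈ h :: t := by
        rw [← List.count_pos_iff]
        omega
      rcases List.mem_cons.mp hPmem with e | hPt
      · exact hPc e.symm
      · exact hnone _ hPt (Or.inr hQS')
    · rw [if_neg b1, if_neg hps] at hcond
      by_cases b3 : c.take (c.length - h.length) = c.drop h.length
      · rw [if_pos b3] at hcond
        omega
      · rw [if_neg b3] at hcond
        omega

theorem pvValid_pairing (c : List Char) (xs : List (List Char)) (hv : pvValid c xs) :
    ∀ y ∈ xs, ∃ x, x ∈ xs ∧ (y ++ x = c ∨ x ++ y = c) := by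
  obtain ⟨h1, h2⟩ := hv
  intro y hy
  have hPS := h1 y hy
  have hm0 : y.length ≤ c.length := by
    rcases hPS with e | e
    · have := congrArg List.length e
      simp at this
      omega
    · have := congrArg List.length e
      simp at this
      omega
  have hmem : ∀ v : List Char, 1 ≤ xs.count v → v ∈ xs := fun v h => List.count_pos_iff.mp h
  have hycnt : 1 ≤ xs.count y := List.count_pos_iff.mpr hy
  have hcond := h2 y.length hm0
  unfold pvCond at hcond
  by_cases hPc : y = c.take y.length
  · have hpair : y ++ c.drop y.length = c := by
      have := List.take_append_drop y.length c
      rw [← hPc] at this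
      exact this
    by_cases b1 : y.length = c.length - y.length
    · rw [if_pos b1] at hcond
      have hsT : c.drop (c.length - y.length) = c.drop y.length := by rw [← b1]
      by_cases hps : c.take y.length = c.drop (c.length - y.length)
      · have hTy : c.drop y.length = y := by
          rw [← hsT, ← hps, ← hPc]
        refine ⟨y, hy, Or.inl ?_⟩
        rw [hTy] at hpair
        exact hpair
      · have hcnt := hcond hps
        rw [← hPc] at hcnt
        refine ⟨c.drop (c.length - y.length), hmem _ (by omega), Or.inl ?_⟩
        rw [hsT]
        exact hpair
    · rw [if_neg b1] at hcond
      by_cases b2 : c.take y.length = c.drop (c.length - y.length)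
      · rw [if_pos b2] at hcond
        have hQy : c.take (c.length - y.length) ++ y = c := by
          have hyS : y = c.drop (c.length - y.length) := hPc.trans b2
          have := List.take_append_drop (c.length - y.length) c
          rw [← hyS] at this
          exact this
        by_cases b3 : c.take (c.length - y.length) = c.drop y.length
        · rw [if_pos b3, ← hPc] at hcond
          exact ⟨c.take (c.length - y.length), hmem _ (by omega), Or.inr hQy⟩
        · rw [if_neg b3, ← hPc] at hcond
          by_cases hT1 : 1 ≤ xs.count (c.drop y.length)
          · exact ⟨c.drop y.length, hmem _ hT1, Or.inl hpair⟩
          · exact ⟨c.take (c.length - y.length), hmem _ (by omega), Or.inr hQy⟩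
      · rw [if_neg b2] at hcond
        by_cases b3 : c.take (c.length - y.length) = c.drop y.length
        · rw [if_pos b3, ← hPc] at hcond
          refine ⟨c.take (c.length - y.length), hmem _ (by omega), Or.inl ?_⟩
          rw [b3]
          exact hpair
        · rw [if_neg b3, ← hPc] at hcond
          exact ⟨c.drop y.length, hmem _ (by omega), Or.inl hpair⟩
  · have hSh : y = c.drop (c.length - y.length) := hPS.resolve_left hPc
    have hQy : c.take (c.length - y.length) ++ y = c := by
      have := List.take_append_drop (c.length - y.length) c
      rw [← hSh] at this
      exact this
    have hps : ¬ (c.take y.length = c.drop (c.length - y.length)) :=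
      fun e => hPc (hSh.trans e.symm)
    by_cases b1 : y.length = c.length - y.length
    · rw [if_pos b1] at hcond
      have hcnt := hcond hps
      rw [← hSh] at hcnt
      have hQP : c.take (c.length - y.length) = c.take y.length := by rw [← b1]
      rw [hQP] at hQy
      exact ⟨c.take y.length, hmem _ (by omega), Or.inr hQy⟩
    · rw [if_neg b1, if_neg hps] at hcond
      by_cases b3 : c.take (c.length - y.length) = c.drop y.length
      · rw [if_pos b3] at hcond
        rw [← hSh] at hcond
        exact ⟨c.take (c.length - y.length), hmem _ (by omega), Or.inr hQy⟩
      · rw [if_neg b3] at hcond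
        obtain ⟨u1, u2⟩ := hcond
        rw [← hSh] at u2
        exact ⟨c.take (c.length - y.length), hmem _ (by omega), Or.inr hQy⟩

theorem pvFindPos_none (W : List (List Char)) (l : List (List Char)) (s : Nat)
    (h : pvG_findPos W s l = none) : ∀ x ∈ l, x ∉ W := by
  induction l generalizing s with
  | nil => intro x hx; cases hx
  | cons a l ih =>
    intro x hx
    rw [pvG_findPos] at h
    by_cases ha : a ∈ W
    · rw [if_pos ha] at h
      cases h
    · rw [if_neg ha] at h
      rcases List.mem_cons.mp hx with rfl | hx'
      · exact ha
      · exact ih (s + 1) h x hx'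

theorem pvFindPos_spec (W : List (List Char)) (l : List (List Char)) (s p : Nat)
    (h : pvG_findPos W s l = some p) : ∃ i, ∃ hi : i < l.length, s + i = p ∧ l[i] ∈ W := by
  induction l generalizing s with
  | nil => cases h
  | cons a l ih =>
    rw [pvG_findPos] at h
    by_cases ha : a ∈ W
    · rw [if_pos ha] at h
      exact ⟨0, by simp, by simpa using h, by simpa using ha⟩
    · rw [if_neg ha] at h
      obtain ⟨i, hi, hip, hiW⟩ := ih (s + 1) h
      exact ⟨i + 1, by simpa using hi, by omega, by simpa using hiW⟩

theorem pvCount_swap (a b v : List Char) (zs : List (List Char)) :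
    (a :: b :: zs).count v = (b :: a :: zs).count v := by
  simp only [List.count_cons, beq_iff_eq]
  split_ifs <;> omega

theorem pvAssemble_iff_valid (c : List Char) (xs : List (List Char)) :
    pvG_assemble c xs = true ↔ pvValid c xs := by
  generalize hn : xs.length = n
  induction n using Nat.strong_induction_on generalizing xs with
  | _ n ih =>
    cases xs with
    | nil =>
      simp only [pvG_assemble]
      constructor
      · intro _
        exact ⟨fun f hf => absurd hf List.not_mem_nil, fun m _ => pvCond_nil c m⟩
      · intro _
        trivial
    | cons h t =>
      rw [pvG_assemble]
      by_cases hself : h ∈ pvG_complements c h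
      · rw [if_pos hself]
        have hcc : c = h ++ h := by
          rcases (pvMem_complements c h h).mp hself with e | e <;> exact e.symm
        rw [ih t.length (by simp at hn; omega) t rfl]
        exact (pvValid_self_cons c h t hcc).symm
      · rw [if_neg hself]
        have hnself : ¬ (h ++ h = c) := fun e => hself ((pvMem_complements c h h).mpr (Or.inl e))
        rcases hF : pvG_findPos (pvG_complements c h) 0 t with _ | pos
        · have hnone : ∀ x ∈ t, ¬(h ++ x = c ∨ x ++ h = c) := by
            intro x hx hd
            exact (pvFindPos_none _ t 0 hF x hx) ((pvMem_complements c h x).mpr hd)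
          simp only [Bool.false_eq_true, false_iff]
          exact pvValid_fail c h t hnself hnone
        · obtain ⟨i, hi, hip, hiW⟩ := pvFindPos_spec _ t 0 pos hF
          have hpi : pos = i := by omega
          subst hpi
          have hpair : h ++ t[pos] = c ∨ t[pos] ++ h = c := (pvMem_complements c h _).mp hiW
          have hperm : (t[pos] :: t.eraseIdx pos).Perm t := List.getElem_cons_eraseIdx_perm hi
          have hle : (t.eraseIdx pos).length = t.length - 1 := List.length_eraseIdx_of_lt hi
          rw [ih (t.eraseIdx pos).length (by simp at hn; omega) _ rfl]
          have hcnt : ∀ v, (h :: t[pos] :: t.eraseIdx pos).count v = (h :: t).count v := by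
            intro v
            have hp := hperm.count_eq v
            rw [List.count_cons] at hp
            simp only [List.count_cons]
            omega
          have step1 : pvValid c (h :: t) ↔ pvValid c (h :: t[pos] :: t.eraseIdx pos) :=
            (pvCount_congr_valid c _ _ hcnt).symm
          rcases hpair with hL | hR
          · exact (step1.trans (pvValid_pair_cons c h t[pos] _ hL)).symm
          · have hswap : pvValid c (h :: t[pos] :: t.eraseIdx pos) ↔
                pvValid c (t[pos] :: h :: t.eraseIdx pos) :=
              pvCount_congr_valid c _ _ (fun v => pvCount_swap h t[pos] v _)
            exact ((step1.trans hswap).trans (pvValid_pair_cons c t[pos] h _ hR)).symm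

theorem pvMap_getD_range (frs : List (List Char)) :
    (List.range frs.length).map (fun k => frs.getD k []) = frs := by
  apply List.ext_getElem (by simp)
  intro k h1 h2
  simp [List.getD_eq_getElem?_getD, List.getElem?_eq_getElem h2]

theorem pvUsed0_filter (frs : List (List Char)) (i j : Nat) (hi : i < frs.length)
    (hj : j < frs.length) :
    ((List.range frs.length).filter
        (fun m => !((((List.replicate frs.length false).set i true).set j true).getD m true))) =
      (List.range frs.length).filter (fun k => ¬(k = i) ∧ ¬(k = j)) := by
  apply List.filter_congr
  intro m hm
  have hmn : m < frs.length := List.mem_range.mp hm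
  by_cases hmj : m = j
  · rw [hmj, pvGetD_set_self_true]
    simp
  · rw [pvGetD_set_ne _ j m true hmj]
    by_cases hmi : m = i
    · rw [hmi, pvGetD_set_self_true]
      simp
    · rw [pvGetD_set_ne _ i m true hmi]
      have : (List.replicate frs.length false).getD m true = false := by
        rw [List.getD_eq_getElem?_getD, List.getElem?_replicate]
        simp [hmn]
      rw [this]
      simp [hmi, hmj]

theorem pvRest_perm (frs : List (List Char)) (i j : Nat) (hij : i ≠ j) (hi : i < frs.length)
    (hj : j < frs.length) :
    (frs.getD i [] :: frs.getD j [] ::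
      ((List.range frs.length).filter (fun k => ¬(k = i) ∧ ¬(k = j))).map
        (fun k => frs.getD k [])).Perm frs := by
  have hidx : (i :: j :: (List.range frs.length).filter (fun k => ¬(k = i) ∧ ¬(k = j))).Perm
      (List.range frs.length) := by
    apply (List.perm_ext_iff_of_nodup ?_ ?_).mpr
    · intro k
      simp only [List.mem_cons, List.mem_filter, List.mem_range, decide_eq_true_eq]
      constructor
      · rintro (rfl | rfl | ⟨hk, _⟩)
        · exact hi
        · exact hj
        · exact hk
      · intro hk
        by_cases hki : k = i
        · exact Or.inl hki
        · by_cases hkj : k = j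
          · exact Or.inr (Or.inl hkj)
          · refine Or.inr (Or.inr ?_)
            simp [hk, hki, hkj]
    · refine List.nodup_cons.mpr ⟨?_, List.nodup_cons.mpr ⟨?_, List.Nodup.filter _ List.nodup_range⟩⟩
      · intro hmem
        rcases List.mem_cons.mp hmem with e | hmem'
        · exact hij e
        · have := (List.mem_filter.mp hmem').2
          simp at this
      · intro hmem
        have := (List.mem_filter.mp hmem).2
        simp at this
    · exact List.nodup_range
  have := hidx.map (fun k => frs.getD k [])
  rw [pvMap_getD_range] at this
  exact this

theorem pvCheckIffValid (frs : List (List Char)) (total : Int) (cand : List Char)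
    (i j : Nat) (hij : i ≠ j) (hi : i < frs.length) (hj : j < frs.length)
    (hcand : frs.getD i [] ++ frs.getD j [] = cand ∨ frs.getD j [] ++ frs.getD i [] = cand)
    (hlen : (cand.length : Int) = total) :
    (pvA_check frs total cand (((List.replicate frs.length false).set i true).set j true)
        (List.range frs.length) = true ↔ pvValid cand frs) := by
  have h0 := pvCheckEq frs total cand hlen frs.length 0
    (((List.replicate frs.length false).set i true).set j true) (by omega)
    (fun m hm => absurd hm (Nat.not_lt_zero m))
  rw [List.drop_zero] at h0
  rw [h0, pvUsed0_filter frs i j hi hj, pvAssemble_iff_valid]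
  have hperm := pvRest_perm frs i j hij hi hj
  have hcnt : ∀ v, (frs.getD i [] :: frs.getD j [] ::
      ((List.range frs.length).filter (fun k => ¬(k = i) ∧ ¬(k = j))).map
        (fun k => frs.getD k [])).count v = frs.count v := fun v => hperm.count_eq v
  have hstep := pvCount_congr_valid cand _ _ hcnt
  rcases hcand with hc | hc
  · rw [← hstep, pvValid_pair_cons cand _ _ _ hc]
  · have hswap := pvCount_congr_valid cand
      (frs.getD i [] :: frs.getD j [] ::
        ((List.range frs.length).filter (fun k => ¬(k = i) ∧ ¬(k = j))).map
          (fun k => frs.getD k []))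
      (frs.getD j [] :: frs.getD i [] ::
        ((List.range frs.length).filter (fun k => ¬(k = i) ∧ ¬(k = j))).map
          (fun k => frs.getD k []))
      (fun v => pvCount_swap (frs.getD i []) (frs.getD j []) v _)
    rw [← hstep, hswap, pvValid_pair_cons cand _ _ _ hc]

theorem pvTryCands_none_iff (frs : List (List Char)) (total : Int) (i j : Nat)
    (c1 c2 : List Char) :
    pvA_tryCands frs total i j [c1, c2] = none ↔
      (pvA_check frs total c1 (((List.replicate frs.length false).set i true).set j true)
          (List.range frs.length) = false ∧
        pvA_check frs total c2 (((List.replicate frs.length false).set i true).set j true)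
          (List.range frs.length) = false) := by
  simp only [pvA_tryCands]
  split_ifs with h1 h2 <;> simp_all

theorem pvTryCands_some (frs : List (List Char)) (total : Int) (i j : Nat)
    (c1 c2 c : List Char)
    (h : pvA_tryCands frs total i j [c1, c2] = some c) :
    (c = c1 ∨ c = c2) ∧
      pvA_check frs total c (((List.replicate frs.length false).set i true).set j true)
        (List.range frs.length) = true := by
  simp only [pvA_tryCands] at h
  split_ifs at h with h1 h2
  · cases h
    exact ⟨Or.inl rfl, h1⟩
  · cases h
    exact ⟨Or.inr rfl, h2⟩

theorem pvLoopJ_none_iff (frs : List (List Char)) (total : Int) (i : Nat) (js : List Nat) :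
    pvA_loopJ frs total i js = none ↔ ∀ j ∈ js, i = j ∨
      ¬(((frs.getD i []).length : Int) + ((frs.getD j []).length : Int) = total) ∨
      pvA_tryCands frs total i j
        [frs.getD i [] ++ frs.getD j [], frs.getD j [] ++ frs.getD i []] = none := by
  induction js with
  | nil => simp [pvA_loopJ]
  | cons j js ih =>
    rw [pvA_loopJ]
    by_cases h1 : i = j
    · rw [if_pos h1, ih]
      simp only [List.forall_mem_cons]
      exact ⟨fun hA => ⟨Or.inl h1, hA⟩, fun hA => hA.2⟩
    · rw [if_neg h1]
      by_cases h2 : ¬(((frs.getD i []).length : Int) + ((frs.getD j []).length : Int) = total)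
      · rw [if_pos h2, ih]
        simp only [List.forall_mem_cons]
        exact ⟨fun hA => ⟨Or.inr (Or.inl h2), hA⟩, fun hA => hA.2⟩
      · rw [if_neg h2]
        rcases hT : pvA_tryCands frs total i j
            [frs.getD i [] ++ frs.getD j [], frs.getD j [] ++ frs.getD i []] with _ | c
        · simp only [ih, List.forall_mem_cons]
          exact ⟨fun hA => ⟨Or.inr (Or.inr hT), hA⟩, fun hA => hA.2⟩
        · simp only [List.forall_mem_cons]
          constructor
          · intro h
            cases h
          · rintro ⟨(e | e | e), _⟩
            · exact absurd e h1
            · exact absurd e h2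
            · rw [e] at hT
              cases hT

theorem pvLoopJ_some (frs : List (List Char)) (total : Int) (i : Nat) (js : List Nat)
    (c : List Char) (h : pvA_loopJ frs total i js = some c) :
    ∃ j ∈ js, ¬(i = j) ∧ (((frs.getD i []).length : Int) + ((frs.getD j []).length : Int) = total) ∧
      pvA_tryCands frs total i j
        [frs.getD i [] ++ frs.getD j [], frs.getD j [] ++ frs.getD i []] = some c := by
  induction js with
  | nil => cases h
  | cons j js ih =>
    rw [pvA_loopJ] at h
    by_cases h1 : i = j
    · rw [if_pos h1] at h
      obtain ⟨j', hm, hrest⟩ := ih h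
      exact ⟨j', List.mem_cons_of_mem _ hm, hrest⟩
    · rw [if_neg h1] at h
      by_cases h2 : ¬(((frs.getD i []).length : Int) + ((frs.getD j []).length : Int) = total)
      · rw [if_pos h2] at h
        obtain ⟨j', hm, hrest⟩ := ih h
        exact ⟨j', List.mem_cons_of_mem _ hm, hrest⟩
      · rw [if_neg h2] at h
        rcases hT : pvA_tryCands frs total i j
            [frs.getD i [] ++ frs.getD j [], frs.getD j [] ++ frs.getD i []] with _ | c'
        · rw [hT] at h
          obtain ⟨j', hm, hrest⟩ := ih h
          exact ⟨j', List.mem_cons_of_mem _ hm, hrest⟩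
        · rw [hT] at h
          cases h
          exact ⟨j, List.mem_cons_self, h1, by omega, hT⟩

theorem pvLoopI_none (frs : List (List Char)) (total : Int) (is : List Nat)
    (h : ∀ i ∈ is, pvA_loopJ frs total i (List.range frs.length) = none) :
    pvA_loopI frs total is = none := by
  induction is with
  | nil => rfl
  | cons i is ih =>
    rw [pvA_loopI, h i List.mem_cons_self]
    exact ih (fun i' hi' => h i' (List.mem_cons_of_mem _ hi'))

theorem pvGetD_eq_getElem' (frs : List (List Char)) (k : Nat) (hk : k < frs.length) :
    frs.getD k [] = frs[k] := by
  rw [List.getD_eq_getElem?_getD, List.getElem?_eq_getElem hk]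
  rfl

theorem pvCollapse (frs : List (List Char)) (total : Int)
    (hsorted : ∀ y ∈ frs, (frs.getD 0 []).length ≤ y.length) (hne : frs ≠ []) :
    pvA_loopI frs total (List.range frs.length) =
      pvA_loopJ frs total 0 (List.range frs.length) := by
  have hn1 : 1 ≤ frs.length := List.length_pos_of_ne_nil hne
  have hrange : List.range frs.length = 0 :: List.range' 1 (frs.length - 1) := by
    rw [List.range_eq_range']
    conv_lhs => rw [show frs.length = (frs.length - 1) + 1 by omega]
    rw [List.range'_succ]
  rcases h0 : pvA_loopJ frs total 0 (List.range frs.length) with _ | c0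
  · apply pvLoopI_none
    intro i hi
    rcases hJi : pvA_loopJ frs total i (List.range frs.length) with _ | c
    · rfl
    · exfalso
      obtain ⟨j, hjmem, hij, hlenj, hTsome⟩ := pvLoopJ_some frs total i _ c hJi
      have hi' : i < frs.length := List.mem_range.mp hi
      have hj' : j < frs.length := List.mem_range.mp hjmem
      obtain ⟨hcin, hchk⟩ := pvTryCands_some frs total i j _ _ c hTsome
      have hclen : (c.length : Int) = total := by
        rcases hcin with rfl | rfl <;> (rw [List.length_append]; push_cast; omega)
      have hvalid : pvValid c frs :=
        (pvCheckIffValid frs total c i j hij hi' hj'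
          (by rcases hcin with rfl | rfl
              · exact Or.inl rfl
              · exact Or.inr rfl) hclen).mp hchk
      have h0mem : frs.getD 0 [] ∈ frs := by
        rw [pvGetD_eq_getElem' frs 0 (by omega)]
        exact List.getElem_mem _
      obtain ⟨x, hxmem, hpair⟩ := pvValid_pairing c frs hvalid _ h0mem
      have hlx : (frs.getD 0 []).length + x.length = c.length := by
        rcases hpair with e | e <;>
          (have := congrArg List.length e; rw [List.length_append] at this; omega)
      by_cases hxh : x = frs.getD 0 []
      · rw [hxh] at hpair hlx
        have hcc : frs.getD 0 [] ++ frs.getD 0 [] = c := by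
          rcases hpair with e | e <;> exact e
        have htake : c.take (frs.getD 0 []).length = frs.getD 0 [] := by
          rw [← hcc]; exact List.take_left
        have hdrop : c.drop (frs.getD 0 []).length = frs.getD 0 [] := by
          rw [← hcc]; exact List.drop_left
        have hall1 : ∀ y ∈ frs, y = frs.getD 0 [] := by
          intro y hy
          obtain ⟨x', hx', hp'⟩ := pvValid_pairing c frs hvalid y hy
          have l1 : y.length + x'.length = c.length := by
            rcases hp' with e | e <;>
              (have := congrArg List.length e; rw [List.length_append] at this; omega)
          have l2 := hsorted y hy
          have l3 := hsorted x' hx'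
          have ly : y.length = (frs.getD 0 []).length := by omega
          rcases hp' with e | e
          · have hty : c.take y.length = y := by rw [← e]; exact List.take_left
            rw [ly, htake] at hty
            exact hty.symm
          · have hdy : c.drop x'.length = y := by rw [← e]; exact List.drop_left
            have lx' : x'.length = (frs.getD 0 []).length := by omega
            rw [lx', hdrop] at hdy
            exact hdy.symm
        have h1n : 1 < frs.length := by omega
        have hf1 : frs.getD 1 [] = frs.getD 0 [] := by
          apply hall1
          rw [pvGetD_eq_getElem' frs 1 h1n]
          exact List.getElem_mem _
        have hcontr := (pvLoopJ_none_iff frs total 0 (List.range frs.length)).mp h0 1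
          (List.mem_range.mpr h1n)
        rcases hcontr with e | e | e
        · cases e
        · apply e
          rw [hf1]
          omega
        · have hc1 : frs.getD 0 [] ++ frs.getD 1 [] = c := by rw [hf1]; exact hcc
          have hchk01 : pvA_check frs total (frs.getD 0 [] ++ frs.getD 1 [])
              (((List.replicate frs.length false).set 0 true).set 1 true)
              (List.range frs.length) = true :=
            (pvCheckIffValid frs total _ 0 1 (by omega) (by omega) h1n (Or.inl rfl)
              (by rw [hc1]; omega)).mpr (by rw [hc1]; exact hvalid)
          have := ((pvTryCands_none_iff frs total 0 1 _ _).mp e).1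
          rw [hchk01] at this
          cases this
      · obtain ⟨l, hl, hxl⟩ := List.getElem_of_mem hxmem
        have hgetl : frs.getD l [] = x := by rw [pvGetD_eq_getElem' frs l hl]; exact hxl
        have hl0 : ¬(0 = l) := by
          intro e
          rw [← e] at hgetl
          exact hxh hgetl.symm
        have hcontr := (pvLoopJ_none_iff frs total 0 (List.range frs.length)).mp h0 l
          (List.mem_range.mpr hl)
        rcases hcontr with e | e | e
        · exact hl0 e
        · apply e
          rw [hgetl]
          omega
        · obtain ⟨e1, e2⟩ := (pvTryCands_none_iff frs total 0 l _ _).mp e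
          rcases hpair with hp | hp
          · have hc1 : frs.getD 0 [] ++ frs.getD l [] = c := by rw [hgetl]; exact hp
            have hchk' : pvA_check frs total (frs.getD 0 [] ++ frs.getD l [])
                (((List.replicate frs.length false).set 0 true).set l true)
                (List.range frs.length) = true :=
              (pvCheckIffValid frs total _ 0 l hl0 (by omega) hl (Or.inl rfl)
                (by rw [hc1]; omega)).mpr (by rw [hc1]; exact hvalid)
            rw [hchk'] at e1
            cases e1
          · have hc2 : frs.getD l [] ++ frs.getD 0 [] = c := by rw [hgetl]; exact hp
            have hchk' : pvA_check frs total (frs.getD l [] ++ frs.getD 0 [])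
                (((List.replicate frs.length false).set 0 true).set l true)
                (List.range frs.length) = true :=
              (pvCheckIffValid frs total _ 0 l hl0 (by omega) hl (Or.inr rfl)
                (by rw [hc2]; omega)).mpr (by rw [hc2]; exact hvalid)
            rw [hchk'] at e2
            cases e2
  · rw [hrange, pvA_loopI, h0]

theorem pvPS_len (c f : List Char) (h : pvPS c f) : f.length ≤ c.length := by
  rcases h with e | e
  · have := congrArg List.length e
    rw [List.length_take] at this
    omega
  · have := congrArg List.length e
    rw [List.length_drop] at this
    omega

theorem pvPortPS_iff (cand f : List Char) (total : Int) (hTc : (cand.length : Int) = total) :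
    (f = PySem.List.slice cand none (some (f.length : Int)) ∨
      f = PySem.List.slice cand (some (total - (f.length : Int))) none) ↔ pvPS cand f := by
  rw [PySem.List.slice_to_natCast]
  by_cases hfl : f.length ≤ cand.length
  · have hk : total - (f.length : Int) = ((cand.length - f.length : Nat) : Int) := by omega
    rw [hk, PySem.List.slice_from_natCast]
    unfold pvPS
    exact Iff.rfl
  · have l1 : f ≠ cand.take f.length := by
      intro e
      have := congrArg List.length e
      rw [List.length_take] at this
      omega
    have l2 : f ≠ PySem.List.slice cand (some (total - (f.length : Int))) none := by
      intro e
      rw [PySem.List.slice_some_none] at e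
      have := congrArg List.length e
      rw [List.length_drop] at this
      omega
    have l3 : f ≠ cand.drop (cand.length - f.length) := by
      intro e
      have := congrArg List.length e
      rw [List.length_drop] at this
      omega
    unfold pvPS
    constructor
    · rintro (e | e)
      · exact absurd e l1
      · exact absurd e l2
    · rintro (e | e)
      · exact absurd e l1
      · exact absurd e l3

theorem pvPrefsufLoop_iff (cand : List Char) (total : Int) (ks : List (List Char)) :
    pvB_prefsufLoop cand total ks = true ↔
      ∀ f ∈ ks, (f = PySem.List.slice cand none (some (f.length : Int)) ∨
        f = PySem.List.slice cand (some (total - (f.length : Int))) none) := by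
  induction ks with
  | nil => simp [pvB_prefsufLoop]
  | cons f fs ih =>
    rw [pvB_prefsufLoop]
    by_cases h : f ≠ PySem.List.slice cand none (some (f.length : Int)) ∧
        f ≠ PySem.List.slice cand (some (total - (f.length : Int))) none
    · rw [if_pos h]
      simp only [Bool.false_eq_true, false_iff]
      intro hall
      rcases hall f List.mem_cons_self with e | e
      · exact h.1 e
      · exact h.2 e
    · rw [if_neg h, ih]
      push_neg at h
      simp only [List.forall_mem_cons]
      constructor
      · intro hrec
        refine ⟨?_, hrec⟩
        by_cases e1 : f = PySem.List.slice cand none (some (f.length : Int))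
        · exact Or.inl e1
        · exact Or.inr (h e1)
      · exact And.right

theorem pvCond_absent (cand : List Char) (xs : List (List Char)) (m : Nat) (hm : m ≤ cand.length)
    (h1 : ∀ f ∈ xs, f.length ≠ m) (h2 : ∀ f ∈ xs, f.length ≠ cand.length - m) :
    pvCond cand xs m := by
  have c1 : xs.count (cand.take m) = 0 :=
    List.count_eq_zero.mpr (fun hmem => h1 _ hmem (by rw [List.length_take]; omega))
  have c2 : xs.count (cand.drop (cand.length - m)) = 0 :=
    List.count_eq_zero.mpr (fun hmem => h1 _ hmem (by rw [List.length_drop]; omega))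
  have c3 : xs.count (cand.take (cand.length - m)) = 0 :=
    List.count_eq_zero.mpr (fun hmem => h2 _ hmem (by rw [List.length_take]; omega))
  have c4 : xs.count (cand.drop m) = 0 :=
    List.count_eq_zero.mpr (fun hmem => h2 _ hmem (by rw [List.length_drop]))
  unfold pvCond
  split_ifs <;> (try constructor) <;> (intros; omega)

theorem pvAllM (cand : List Char) (xs : List (List Char))
    (hlen : ∀ f ∈ xs, f.length ≤ cand.length)
    (hall : ∀ f ∈ xs, pvCond cand xs f.length) :
    ∀ m, m ≤ cand.length → pvCond cand xs m := by
  intro m hm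
  by_cases he1 : ∃ f ∈ xs, f.length = m
  · obtain ⟨f, hf, e⟩ := he1
    rw [← e]
    exact hall f hf
  · by_cases he2 : ∃ f ∈ xs, f.length = cand.length - m
    · obtain ⟨f, hf, e⟩ := he2
      have := hall f hf
      rw [e] at this
      exact (pvCond_symm cand xs m hm).mp this
    · push_neg at he1 he2
      exact pvCond_absent cand xs m hm he1 he2

theorem pvCondLoop_cons (frs fs : List (List Char)) (cand f : List Char) (total : Int)
    (hTc : (cand.length : Int) = total) (hfl : f.length ≤ cand.length) :
    pvB_condLoop cand total (PySem.Dict.counter frs) (f :: fs) = true ↔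
      (pvCond cand frs f.length ∧
        pvB_condLoop cand total (PySem.Dict.counter frs) fs = true) := by
  have hk : total - (f.length : Int) = ((cand.length - f.length : Nat) : Int) := by omega
  simp only [pvB_condLoop]
  rw [hk]
  have ht2 : total - ((cand.length - f.length : Nat) : Int) = ((f.length : Nat) : Int) := by omega
  rw [ht2]
  simp only [PySem.List.slice_to_natCast, PySem.List.slice_from_natCast, PySem.Dict.getD_counter]
  unfold pvCond
  by_cases b1 : f.length = cand.length - f.length
  · rw [if_pos (show ((f.length : Nat) : Int) = ((cand.length - f.length : Nat) : Int) from by exact_mod_cast b1), if_pos b1]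
    by_cases b2 : cand.take f.length = cand.drop (cand.length - f.length)
    · rw [if_neg (by simp [b2])]
      exact ⟨fun hrec => ⟨fun hne => absurd b2 hne, hrec⟩, And.right⟩
    · by_cases b4 : frs.count (cand.take f.length) = frs.count (cand.drop (cand.length - f.length))
      · rw [if_neg (by rintro ⟨_, hne⟩; exact hne (by exact_mod_cast b4))]
        exact ⟨fun hrec => ⟨fun _ => b4, hrec⟩, And.right⟩
      · rw [if_pos ⟨b2, fun e => b4 (by exact_mod_cast e)⟩]
        simp only [Bool.false_eq_true, false_iff]
        rintro ⟨hc, _⟩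
        exact b4 (hc b2)
  · rw [if_neg (fun e => b1 (by exact_mod_cast e)), if_neg b1]
    by_cases b2 : cand.take f.length = cand.drop (cand.length - f.length)
    · rw [if_pos b2, if_pos b2]
      by_cases b3 : cand.take (cand.length - f.length) = cand.drop f.length
      · rw [if_pos b3, if_pos b3]
        by_cases b4 : frs.count (cand.take f.length) = frs.count (cand.take (cand.length - f.length))
        · rw [if_neg (fun hne => hne (by exact_mod_cast b4))]
          exact ⟨fun hrec => ⟨b4, hrec⟩, And.right⟩
        · rw [if_pos (fun e => b4 (by exact_mod_cast e))]
          simp only [Bool.false_eq_true, false_iff]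
          rintro ⟨hc, _⟩
          exact b4 hc
      · rw [if_neg b3, if_neg b3]
        by_cases b4 : frs.count (cand.take f.length) =
            frs.count (cand.take (cand.length - f.length)) + frs.count (cand.drop f.length)
        · rw [if_neg (fun hne => hne (by push_cast; omega))]
          exact ⟨fun hrec => ⟨b4, hrec⟩, And.right⟩
        · rw [if_pos (fun e => b4 (by push_cast at e; omega))]
          simp only [Bool.false_eq_true, false_iff]
          rintro ⟨hc, _⟩
          exact b4 hc
    · rw [if_neg b2, if_neg b2]
      by_cases b3 : cand.take (cand.length - f.length) = cand.drop f.length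
      · rw [if_pos b3, if_pos b3]
        by_cases b4 : frs.count (cand.take (cand.length - f.length)) =
            frs.count (cand.take f.length) + frs.count (cand.drop (cand.length - f.length))
        · rw [if_neg (fun hne => hne (by push_cast; omega))]
          exact ⟨fun hrec => ⟨b4, hrec⟩, And.right⟩
        · rw [if_pos (fun e => b4 (by push_cast at e; omega))]
          simp only [Bool.false_eq_true, false_iff]
          rintro ⟨hc, _⟩
          exact b4 hc
      · rw [if_neg b3, if_neg b3]
        by_cases b4 : frs.count (cand.take f.length) = frs.count (cand.drop f.length)
        · by_cases b5 : frs.count (cand.drop (cand.length - f.length)) =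
              frs.count (cand.take (cand.length - f.length))
          · have hnot : ¬((frs.count (cand.take f.length) : Int) ≠ (frs.count (cand.drop f.length) : Int) ∨
                (frs.count (cand.drop (cand.length - f.length)) : Int) ≠ (frs.count (cand.take (cand.length - f.length)) : Int)) := by
              rintro (hne | hne)
              · exact hne (by exact_mod_cast b4)
              · exact hne (by exact_mod_cast b5)
            rw [if_neg hnot]
            exact ⟨fun hrec => ⟨⟨b4, b5⟩, hrec⟩, And.right⟩
          · rw [if_pos (Or.inr (fun e => b5 (by exact_mod_cast e)))]
            simp only [Bool.false_eq_true, false_iff]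
            rintro ⟨⟨_, hc⟩, _⟩
            exact b5 hc
        · rw [if_pos (Or.inl (fun e => b4 (by exact_mod_cast e)))]
          simp only [Bool.false_eq_true, false_iff]
          rintro ⟨⟨hc, _⟩, _⟩
          exact b4 hc

theorem pvCondLoop_iff (frs : List (List Char)) (cand : List Char) (total : Int)
    (hTc : (cand.length : Int) = total) (ks : List (List Char))
    (hlen : ∀ f ∈ ks, f.length ≤ cand.length) :
    pvB_condLoop cand total (PySem.Dict.counter frs) ks = true ↔
      ∀ f ∈ ks, pvCond cand frs f.length := by
  induction ks with
  | nil => simp [pvB_condLoop]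
  | cons f fs ih =>
    rw [pvCondLoop_cons frs fs cand f total hTc (hlen f List.mem_cons_self),
      ih (fun g hg => hlen g (List.mem_cons_of_mem _ hg))]
    simp

theorem pvPairsUp_iff (frs : List (List Char)) (cand : List Char) (total : Int)
    (hTc : (cand.length : Int) = total) :
    pvB_pairsUp cand (PySem.Dict.counter frs) total = true ↔ pvValid cand frs := by
  unfold pvB_pairsUp
  rw [Bool.and_eq_true, PySem.Dict.keys_counter, pvPrefsufLoop_iff]
  have hmem : ∀ f : List Char, f ∈ PySem.Set.ofList frs ↔ f ∈ frs := fun f => PySem.Set.mem_ofList frs f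
  constructor
  · rintro ⟨h1, h2⟩
    have hPS : ∀ f ∈ frs, pvPS cand f := fun f hf =>
      (pvPortPS_iff cand f total hTc).mp (h1 f ((hmem f).mpr hf))
    have hlen : ∀ f ∈ frs, f.length ≤ cand.length := fun f hf => pvPS_len _ _ (hPS f hf)
    have hlen' : ∀ f ∈ PySem.Set.ofList frs, f.length ≤ cand.length :=
      fun f hf => hlen f ((hmem f).mp hf)
    have hcondk := (pvCondLoop_iff frs cand total hTc _ hlen').mp h2
    exact ⟨hPS, pvAllM cand frs hlen (fun f hf => hcondk f ((hmem f).mpr hf))⟩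
  · rintro ⟨hPS, hcond⟩
    have hlen : ∀ f ∈ frs, f.length ≤ cand.length := fun f hf => pvPS_len _ _ (hPS f hf)
    have hlen' : ∀ f ∈ PySem.Set.ofList frs, f.length ≤ cand.length :=
      fun f hf => hlen f ((hmem f).mp hf)
    refine ⟨fun f hf => (pvPortPS_iff cand f total hTc).mpr (hPS f ((hmem f).mp hf)), ?_⟩
    exact (pvCondLoop_iff frs cand total hTc _ hlen').mpr
      (fun f hf => hcond f.length (hlen f ((hmem f).mp hf)))
theorem pvScanEq (frs : List (List Char)) (total : Int) :
    ∀ (k s : Nat), 1 ≤ s → frs.length - s = k →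
      pvA_loopJ frs total 0 (List.range' s (frs.length - s)) =
        pvB_scan (frs.getD 0 []) total (PySem.Dict.counter frs) (frs.drop s) := by
  intro k
  induction k with
  | zero =>
    intro s hs1 hk
    rw [hk, List.drop_eq_nil_of_le (by omega)]
    rfl
  | succ k ih =>
    intro s hs1 hk
    have hs : s < frs.length := by omega
    have hdrop : frs.drop s = frs.getD s [] :: frs.drop (s + 1) := by
      rw [pvGetD_eq_getElem' frs s hs]
      exact List.drop_eq_getElem_cons hs
    have hrs : frs.length - s = (frs.length - (s + 1)) + 1 := by omega
    rw [hrs, List.range'_succ, hdrop, pvA_loopJ, pvB_scan, if_neg (by omega : ¬(0 = s))]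
    by_cases hlen : ((frs.getD 0 []).length : Int) + ((frs.getD s []).length : Int) = total
    · rw [if_neg (not_not_intro hlen), if_neg (not_not_intro hlen)]
      have hc1len : (((frs.getD 0 [] ++ frs.getD s []).length : Nat) : Int) = total := by
        rw [List.length_append]
        push_cast
        omega
      have hc2len : (((frs.getD s [] ++ frs.getD 0 []).length : Nat) : Int) = total := by
        rw [List.length_append]
        push_cast
        omega
      have e1 : pvA_check frs total (frs.getD 0 [] ++ frs.getD s [])
          (((List.replicate frs.length false).set 0 true).set s true)
          (List.range frs.length) =
          pvB_pairsUp (frs.getD 0 [] ++ frs.getD s []) (PySem.Dict.counter frs) total :=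
        Bool.eq_iff_iff.mpr
          ((pvCheckIffValid frs total _ 0 s (by omega) (by omega) hs (Or.inl rfl) hc1len).trans
            (pvPairsUp_iff frs _ total hc1len).symm)
      have e2 : pvA_check frs total (frs.getD s [] ++ frs.getD 0 [])
          (((List.replicate frs.length false).set 0 true).set s true)
          (List.range frs.length) =
          pvB_pairsUp (frs.getD s [] ++ frs.getD 0 []) (PySem.Dict.counter frs) total :=
        Bool.eq_iff_iff.mpr
          ((pvCheckIffValid frs total _ 0 s (by omega) (by omega) hs (Or.inr rfl) hc2len).trans
            (pvPairsUp_iff frs _ total hc2len).symm)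
      simp only [pvA_tryCands]
      rw [e1, e2]
      cases hb1 : pvB_pairsUp (frs.getD 0 [] ++ frs.getD s []) (PySem.Dict.counter frs) total
      · cases hb2 : pvB_pairsUp (frs.getD s [] ++ frs.getD 0 []) (PySem.Dict.counter frs) total
        · simp only [Bool.false_eq_true, if_false]
          exact ih (s + 1) (by omega) (by omega)
        · simp
      · simp
    · rw [if_pos hlen, if_pos hlen]
      exact ih (s + 1) (by omega) (by omega)

-- ===== VERDICT (by name: the statement is the Claim_ definition above) =====
theorem restore_original_spec : Claim_equal_restore_original := by
  intro fragments _
  unfold Spec_restore_original restore_original restore_original_alt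
  by_cases hnil : fragments = []
  · simp [hnil]
  · simp only [hnil, if_false]
    have hssne : PySem.List.sorted fragments (fun x => PySem.Str.len x) false ≠ [] :=
      fun e => hnil ((PySem.List.sorted_eq_nil_iff fragments _ false).mp e)
    set frs := (PySem.List.sorted fragments (fun x => PySem.Str.len x) false).map String.toList
      with hfrs
    have hfrsne : frs ≠ [] := fun e => hssne (List.map_eq_nil_iff.mp (hfrs ▸ e))
    have hn1 : 1 ≤ frs.length := List.length_pos_of_ne_nil hfrsne
    have hsl : ∀ s : String, PySem.Str.len s = (s.toList.length : Int) := fun s => by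
      simp [pysem]
    have hsorted : ∀ y ∈ frs, (frs.getD 0 []).length ≤ y.length := by
      cases hss : PySem.List.sorted fragments (fun x => PySem.Str.len x) false with
      | nil => exact absurd hss hssne
      | cons m t =>
        have hkey := PySem.List.key_head_sorted_le _ _ hss
        have hhead : frs.getD 0 [] = m.toList := by
          rw [hfrs, hss]
          rfl
        intro y hy
        rw [hfrs] at hy
        rcases List.mem_map.mp hy with ⟨a, ha, rfl⟩
        have hamem : a ∈ fragments := by
          first
          | exact (PySem.List.mem_sorted _ _ _ _).mp ha
          | exact (PySem.List.mem_sorted _ _ _).mp ha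
          | exact PySem.List.mem_sorted.mp ha
          | simpa [PySem.List.mem_sorted] using ha
        have := hkey a hamem
        rw [hsl, hsl] at this
        rw [hhead]
        exact_mod_cast this
    rw [PySem.Dict.foldl_insert_getD_add_one_eq_counter, PySem.List.slice_from_one,
      ← List.drop_one]
    simp only [PySem.List.pyGetD_zero]
    have hrange : List.range frs.length = 0 :: List.range' 1 (frs.length - 1) := by
      rw [List.range_eq_range']
      conv_lhs => rw [show frs.length = (frs.length - 1) + 1 by omega]
      rw [List.range'_succ]
    rw [pvCollapse frs _ hsorted hfrsne, hrange, pvA_loopJ, if_pos rfl,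
      pvScanEq frs _ (frs.length - 1) 1 (by omega) rfl]
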